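-- pv_equiv track=rewrite | github.com/Uiota/flower-hackathon-offline-guard | team-building/p2p-collab/mesh-coordination.py | _get_region
-- ===== SOURCE A (Python) =====
-- def _get_region(location: str) -> str:
--     """Get region from location (simplified)"""
--     location = location.lower()
--     if any(city in location for city in ["san francisco", "sf", "bay area", "silicon valley"]):
--         return "sf_bay_area"
--     elif any(city in location for city in ["new york", "nyc", "ny"]):
--         return "new_york"
--     elif any(city in location for city in ["london", "uk", "britain"]):
--         return "london"
--     else:
--         return "other"
-- ===== SOURCE B (Python) =====
-- # Single left-to-right positional scan: at each index, test which keywords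
-- # start there and keep the minimum region-group index seen; map it to a label.
-- KEYWORDS = [
--     ("san francisco", 0), ("sf", 0), ("bay area", 0), ("silicon valley", 0),
--     ("new york", 1), ("nyc", 1), ("ny", 1),
--     ("london", 2), ("uk", 2), ("britain", 2),
-- ]
-- LABELS = ["sf_bay_area", "new_york", "london", "other"]
--
--
-- def _get_region(location: str) -> str:
--     """Get region from location (simplified)"""
--     loc = location.lower()
--     best = 3
--     for i in range(len(loc)):
--         for kw, g in KEYWORDS:
--             if g < best and loc.startswith(kw, i):
--                 best = g
--     return LABELS[best]
-- ===== Notes on version B (the rewrite author's own statement) =====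
-- stated objective: alternative
-- what changed: Replaces the if/elif chain of per-group substring tests with a single left-to-right positional scan that tests which keywords start at each index and keeps a minimum group-index accumulator mapped to a label at the end; it trades the C-speed str.in calls for an explicit per-position scan, so it is not faster in CPython.
import Mathlib
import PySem

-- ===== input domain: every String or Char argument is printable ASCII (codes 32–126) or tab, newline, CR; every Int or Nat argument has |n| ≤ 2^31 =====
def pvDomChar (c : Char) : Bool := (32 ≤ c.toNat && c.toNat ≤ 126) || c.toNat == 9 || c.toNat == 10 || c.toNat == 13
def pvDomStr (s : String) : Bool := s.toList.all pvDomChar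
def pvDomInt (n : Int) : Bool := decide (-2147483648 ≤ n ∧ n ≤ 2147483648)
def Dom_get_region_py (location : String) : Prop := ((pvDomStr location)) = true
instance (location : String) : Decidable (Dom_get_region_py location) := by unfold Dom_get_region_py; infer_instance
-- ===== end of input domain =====

-- B replaces A's if/elif chain of per-group substring tests with a single positional scan keeping a minimum group-index accumulator (alternative algorithm; same behaviour, same cost).


-- ===== PORT A =====
def get_region_py (location : String) : String :=
  let loc := PySem.Str.lower location
  if ["san francisco", "sf", "bay area", "silicon valley"].any (fun city => PySem.Str.isIn city loc) then
    "sf_bay_area"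
  else if ["new york", "nyc", "ny"].any (fun city => PySem.Str.isIn city loc) then
    "new_york"
  else if ["london", "uk", "britain"].any (fun city => PySem.Str.isIn city loc) then
    "london"
  else
    "other"

-- ===== PORT B =====
def kwTable : List (List Char × Nat) :=
  [("san francisco".toList, 0), ("sf".toList, 0), ("bay area".toList, 0), ("silicon valley".toList, 0),
   ("new york".toList, 1), ("nyc".toList, 1), ("ny".toList, 1),
   ("london".toList, 2), ("uk".toList, 2), ("britain".toList, 2)]

def regionLabels : List String := ["sf_bay_area", "new_york", "london", "other"]

-- loc.startswith(kw, i) for 0 ≤ i is exactly: kw is a prefix of loc[i:]  (ported by hand, exact on this domain)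
def get_region_py_alt (location : String) : String :=
  let loc := (PySem.Str.lower location).toList
  let best := (List.range loc.length).foldl (fun best i =>
    kwTable.foldl (fun b kg =>
      if kg.2 < b ∧ PySem.Chars.startswith (loc.drop i) kg.1 then kg.2 else b) best) 3
  regionLabels.getD best "other"

-- ===== PRECONDITION & SPEC =====
def Spec_get_region_py (location : String) (out : String) : Prop := out = get_region_py_alt location
instance (location : String) (out : String) : Decidable (Spec_get_region_py location out) := by unfold Spec_get_region_py; infer_instance

-- ===== CLAIM (what is proved, stated in full; the proofs are below) =====
def Claim_equal_get_region_py : Prop := ∀ (location : String), Dom_get_region_py location → Spec_get_region_py location (get_region_py location)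

-- ===== LEMMAS AND PROOFS =====

-- the step of B's scan, and the flattened single fold the nested scan computes
def pvStep (s : List Char) (b : Nat) (x : Nat × (List Char × Nat)) : Nat :=
  if x.2.2 < b ∧ PySem.Chars.startswith (s.drop x.1) x.2.1 then x.2.2 else b

def pvFlat (s : List Char) : List (Nat × (List Char × Nat)) :=
  (List.range s.length).flatMap fun i => kwTable.map (Prod.mk i)

theorem foldl_foldl_flat (s : List Char) (P : List Nat) (b : Nat) :
    P.foldl (fun b i => kwTable.foldl (fun b kg =>
        if kg.2 < b ∧ PySem.Chars.startswith (s.drop i) kg.1 then kg.2 else b) b) b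
    = (P.flatMap fun i => kwTable.map (Prod.mk i)).foldl (pvStep s) b := by
  induction P generalizing b with
  | nil => rfl
  | cons i P ih =>
    simp only [List.foldl_cons, List.flatMap_cons, List.foldl_append, List.foldl_map, ih]
    rfl

theorem pvStep_le (s : List Char) (b : Nat) (x : Nat × (List Char × Nat)) :
    pvStep s b x ≤ b := by
  unfold pvStep
  split
  · next h => exact le_of_lt h.1
  · exact le_refl b

theorem pvStep_fold_le (s : List Char) (L : List (Nat × (List Char × Nat))) (b : Nat) :
    L.foldl (pvStep s) b ≤ b := by
  induction L generalizing b with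
  | nil => exact le_refl b
  | cons x L ih =>
    simp only [List.foldl_cons]
    exact (ih _).trans (pvStep_le s b x)

theorem pvStep_fold_ub (s : List Char) (L : List (Nat × (List Char × Nat)))
    (x : Nat × (List Char × Nat))
    (hp : PySem.Chars.startswith (s.drop x.1) x.2.1 = true) :
    ∀ b, x ∈ L → L.foldl (pvStep s) b ≤ x.2.2 := by
  induction L with
  | nil => intro b hx; cases hx
  | cons y L ih =>
    intro b hx
    simp only [List.foldl_cons]
    rcases List.mem_cons.mp hx with rfl | hx
    · refine (pvStep_fold_le s L _).trans ?_
      unfold pvStep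
      by_cases hlt : x.2.2 < b
      · rw [if_pos ⟨hlt, hp⟩]
      · rw [if_neg (fun h => hlt h.1)]; omega
    · exact ih _ hx

theorem pvStep_fold_cases (s : List Char) (L : List (Nat × (List Char × Nat))) (b : Nat) :
    L.foldl (pvStep s) b = b ∨
      ∃ x ∈ L, PySem.Chars.startswith (s.drop x.1) x.2.1 = true ∧ L.foldl (pvStep s) b = x.2.2 := by
  induction L generalizing b with
  | nil => exact Or.inl rfl
  | cons y L ih =>
    simp only [List.foldl_cons]
    by_cases hc : y.2.2 < b ∧ PySem.Chars.startswith (s.drop y.1) y.2.1 = true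
    · have hstep : pvStep s b y = y.2.2 := by simp [pvStep, hc.1, hc.2]
      rw [hstep]
      rcases ih y.2.2 with h | ⟨x, hx, hp, he⟩
      · exact Or.inr ⟨y, List.mem_cons_self, hc.2, h⟩
      · exact Or.inr ⟨x, List.mem_cons_of_mem _ hx, hp, he⟩
    · have hstep : pvStep s b y = b := by
        simp only [pvStep]
        rw [if_neg (by simpa using hc)]
      rw [hstep]
      rcases ih b with h | ⟨x, hx, hp, he⟩
      · exact Or.inl h
      · exact Or.inr ⟨x, List.mem_cons_of_mem _ hx, hp, he⟩

theorem kwTable_ne_nil (kw : List Char) (g : Nat) (h : (kw, g) ∈ kwTable) : kw ≠ [] := by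
  simp only [kwTable, List.mem_cons, List.not_mem_nil, or_false, Prod.mk.injEq] at h
  rcases h with ⟨h, -⟩ | ⟨h, -⟩ | ⟨h, -⟩ | ⟨h, -⟩ | ⟨h, -⟩ | ⟨h, -⟩ | ⟨h, -⟩ | ⟨h, -⟩ | ⟨h, -⟩ | ⟨h, -⟩ <;>
    (rw [h]; decide)

theorem kwTable_groups (kw : List Char) (g : Nat) (h : (kw, g) ∈ kwTable) :
    g = 0 ∨ g = 1 ∨ g = 2 := by
  simp only [kwTable, List.mem_cons, List.not_mem_nil, or_false, Prod.mk.injEq] at h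
  rcases h with ⟨-, h⟩ | ⟨-, h⟩ | ⟨-, h⟩ | ⟨-, h⟩ | ⟨-, h⟩ | ⟨-, h⟩ | ⟨-, h⟩ | ⟨-, h⟩ | ⟨-, h⟩ | ⟨-, h⟩ <;>
    omega

-- "a match for keyword kw exists at some scanned position" ↔ "kw in loc" (kw nonempty)
theorem exists_pos_match_iff (s kw : List Char) (hkw : kw ≠ []) :
    (∃ i ∈ List.range s.length, PySem.Chars.startswith (s.drop i) kw = true)
      ↔ PySem.Chars.isIn kw s = true := by
  constructor
  · rintro ⟨i, -, hp⟩
    rw [← PySem.Chars.exists_prefix_drop_iff_isIn]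
    exact ⟨i, (PySem.Chars.startswith_iff _ _).mp hp⟩
  · intro h
    rcases (PySem.Chars.exists_prefix_drop_iff_isIn kw s).mpr h with ⟨j, hj⟩
    by_cases hjl : j < s.length
    · exact ⟨j, List.mem_range.mpr hjl, (PySem.Chars.startswith_iff _ _).mpr hj⟩
    · exfalso
      rw [List.drop_eq_nil_of_le (by omega)] at hj
      exact hkw (List.prefix_nil.mp hj)

theorem mem_pvFlat (s : List Char) (x : Nat × (List Char × Nat)) :
    x ∈ pvFlat s ↔ x.1 ∈ List.range s.length ∧ x.2 ∈ kwTable := by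
  unfold pvFlat
  simp only [List.mem_flatMap, List.mem_map]
  constructor
  · rintro ⟨i, hi, kg, hkg, rfl⟩; exact ⟨hi, hkg⟩
  · rcases x with ⟨i, kg⟩
    rintro ⟨hi, hkg⟩; exact ⟨i, hi, kg, hkg, rfl⟩

def pvMatch (s : List Char) (g : Nat) : Prop :=
  ∃ x ∈ pvFlat s, PySem.Chars.startswith (s.drop x.1) x.2.1 = true ∧ x.2.2 = g

theorem pvMatch_iff (s : List Char) (g : Nat) :
    pvMatch s g ↔ ∃ kw, (kw, g) ∈ kwTable ∧ PySem.Chars.isIn kw s = true := by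
  constructor
  · rintro ⟨⟨i, kw, g'⟩, hx, hp, rfl⟩
    rcases (mem_pvFlat s _).mp hx with ⟨hi, hkg⟩
    exact ⟨kw, hkg, (exists_pos_match_iff s kw (kwTable_ne_nil kw _ hkg)).mp ⟨i, hi, hp⟩⟩
  · rintro ⟨kw, hkg, hin⟩
    rcases (exists_pos_match_iff s kw (kwTable_ne_nil kw g hkg)).mpr hin with ⟨i, hi, hp⟩
    exact ⟨(i, kw, g), (mem_pvFlat s _).mpr ⟨hi, hkg⟩, hp, rfl⟩

-- characterisation of B's accumulator value
theorem best_spec (s : List Char) :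
    (pvMatch s 0 → (pvFlat s).foldl (pvStep s) 3 = 0) ∧
    (¬ pvMatch s 0 → pvMatch s 1 → (pvFlat s).foldl (pvStep s) 3 = 1) ∧
    (¬ pvMatch s 0 → ¬ pvMatch s 1 → pvMatch s 2 → (pvFlat s).foldl (pvStep s) 3 = 2) ∧
    (¬ pvMatch s 0 → ¬ pvMatch s 1 → ¬ pvMatch s 2 → (pvFlat s).foldl (pvStep s) 3 = 3) := by
  have hub : ∀ g, pvMatch s g → (pvFlat s).foldl (pvStep s) 3 ≤ g := by
    rintro g ⟨x, hx, hp, rfl⟩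
    exact pvStep_fold_ub s _ x hp 3 hx
  have hcases := pvStep_fold_cases s (pvFlat s) 3
  refine ⟨fun h0 => ?_, fun h0 h1 => ?_, fun h0 h1 h2 => ?_, fun h0 h1 h2 => ?_⟩
  · have := hub 0 h0; omega
  · have hle := hub 1 h1
    rcases hcases with h | ⟨x, hx, hp, he⟩
    · omega
    · have hm : pvMatch s x.2.2 := ⟨x, hx, hp, rfl⟩
      rcases kwTable_groups x.2.1 x.2.2 (by
          have := ((mem_pvFlat s x).mp hx).2; simpa using this) with hg | hg | hg <;> rw [hg] at hm
      · exact absurd hm h0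
      · omega
      · omega
  · have hle := hub 2 h2
    rcases hcases with h | ⟨x, hx, hp, he⟩
    · omega
    · have hm : pvMatch s x.2.2 := ⟨x, hx, hp, rfl⟩
      rcases kwTable_groups x.2.1 x.2.2 (by
          have := ((mem_pvFlat s x).mp hx).2; simpa using this) with hg | hg | hg <;> rw [hg] at hm
      · exact absurd hm h0
      · exact absurd hm h1
      · omega
  · rcases hcases with h | ⟨x, hx, hp, he⟩
    · exact h
    · have hm : pvMatch s x.2.2 := ⟨x, hx, hp, rfl⟩
      rcases kwTable_groups x.2.1 x.2.2 (by
          have := ((mem_pvFlat s x).mp hx).2; simpa using this) with hg | hg | hg <;> rw [hg] at hm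
      · exact absurd hm h0
      · exact absurd hm h1
      · exact absurd hm h2

-- A's three group tests, expressed through pvMatch
theorem group0_iff (location : String) :
    ((["san francisco", "sf", "bay area", "silicon valley"].any
        fun city => PySem.Str.isIn city (PySem.Str.lower location)) = true)
      ↔ pvMatch (PySem.Str.lower location).toList 0 := by
  rw [pvMatch_iff]
  simp [kwTable]

theorem group1_iff (location : String) :
    ((["new york", "nyc", "ny"].any
        fun city => PySem.Str.isIn city (PySem.Str.lower location)) = true)
      ↔ pvMatch (PySem.Str.lower location).toList 1 := by
  rw [pvMatch_iff]
  simp [kwTable]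

theorem group2_iff (location : String) :
    ((["london", "uk", "britain"].any
        fun city => PySem.Str.isIn city (PySem.Str.lower location)) = true)
      ↔ pvMatch (PySem.Str.lower location).toList 2 := by
  rw [pvMatch_iff]
  simp [kwTable]

-- ===== VERDICT (by name: the statement is the Claim_ definition above) =====
theorem get_region_py_spec : Claim_equal_get_region_py := by
  intro location _
  unfold Spec_get_region_py
  simp only [get_region_py, get_region_py_alt]
  rw [foldl_foldl_flat]
  rw [show ((List.range (PySem.Str.lower location).toList.length).flatMap fun i =>
        kwTable.map (Prod.mk i)) = pvFlat (PySem.Str.lower location).toList from rfl]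
  have hb := best_spec (PySem.Str.lower location).toList
  have h0 := group0_iff location
  have h1 := group1_iff location
  have h2 := group2_iff location
  by_cases m0 : pvMatch (PySem.Str.lower location).toList 0
  · rw [hb.1 m0, if_pos (h0.mpr m0)]
    rfl
  · rw [if_neg (fun h => m0 (h0.mp h))]
    by_cases m1 : pvMatch (PySem.Str.lower location).toList 1
    · rw [hb.2.1 m0 m1, if_pos (h1.mpr m1)]
      rfl
    · rw [if_neg (fun h => m1 (h1.mp h))]
      by_cases m2 : pvMatch (PySem.Str.lower location).toList 2
      · rw [hb.2.2.1 m0 m1 m2, if_pos (h2.mpr m2)]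
        rfl
      · rw [if_neg (fun h => m2 (h2.mp h)), hb.2.2.2 m0 m1 m2]
        rfl
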